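-- pv_equiv track=rewrite | github.com/RVDROU/NsiClaveille | files/1_NSI/Cours/chap1_Langage/chap1-7_dictionnaires/codes/1NSI_chap1_7_dictionnaires_miserables_eleve.py | mot_le_plus_long
-- ===== SOURCE A (Python) =====
-- def mot_le_plus_long(dico) :
--     '''Recherche l occurrence la plus longue
--     retour : mot le plus frequent
--     '''
--     cle = ''
--     nmax = 0
--     for mot in dico:
--         if len(mot) > nmax :
--             cle = mot
--             nmax = len(mot)
--     return cle,nmax
-- ===== SOURCE B (Python) =====
-- def mot_le_plus_long(dico):
--     '''Recherche l occurrence la plus longue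
--     retour : mot le plus frequent
--     '''
--     if not dico:
--         return '', 0
--     cle = sorted(dico, key=len, reverse=True)[0]
--     return cle, len(cle)
-- ===== Notes on version B (the rewrite author's own statement) =====
-- stated objective: alternative
-- what changed: Replaces the manual running-max loop over the keys by a stable reverse sort on key length whose first element is the longest key (stability preserves A's first-encountered tie-break), with an explicit empty-dict guard.
import Mathlib
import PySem

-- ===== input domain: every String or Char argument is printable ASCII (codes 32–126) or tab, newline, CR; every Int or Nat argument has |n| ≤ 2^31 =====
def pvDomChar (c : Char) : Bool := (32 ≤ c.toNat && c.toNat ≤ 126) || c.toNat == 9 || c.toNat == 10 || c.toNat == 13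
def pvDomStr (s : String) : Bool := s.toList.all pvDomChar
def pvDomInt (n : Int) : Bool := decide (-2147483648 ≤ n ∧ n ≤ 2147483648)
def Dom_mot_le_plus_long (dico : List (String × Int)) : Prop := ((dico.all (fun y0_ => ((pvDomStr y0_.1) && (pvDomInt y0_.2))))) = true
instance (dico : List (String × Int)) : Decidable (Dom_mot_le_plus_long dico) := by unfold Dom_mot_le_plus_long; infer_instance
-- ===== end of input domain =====

-- B replaces A's running-max loop over the keys by a stable length-descending sort
-- whose first element is the longest key (stability keeps A's first-wins tie-break);
-- alternative decomposition, not claimed faster.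


-- ===== PORT A =====
def mot_le_plus_long (dico : List (String × Int)) : String × Int :=
  dico.foldl
    (fun st mot =>
      if PySem.Str.len mot.1 > st.2 then (mot.1, PySem.Str.len mot.1) else st)
    ("", 0)

-- ===== PORT B =====
def mot_le_plus_long_alt (dico : List (String × Int)) : String × Int :=
  if dico.isEmpty then ("", 0)
  else
    let cle := (PySem.List.sorted (dico.map Prod.fst) (fun m => PySem.Str.len m) true).headD ""
    (cle, PySem.Str.len cle)

-- ===== PRECONDITION & SPEC =====
def Spec_mot_le_plus_long (dico : List (String × Int)) (out : String × Int) : Prop := out = mot_le_plus_long_alt dico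
instance (dico : List (String × Int)) (out : String × Int) : Decidable (Spec_mot_le_plus_long dico out) := by unfold Spec_mot_le_plus_long; infer_instance

-- ===== CLAIM (what is proved, stated in full; the proofs are below) =====
def Claim_equal_mot_le_plus_long : Prop := ∀ (dico : List (String × Int)), Dom_mot_le_plus_long dico → Spec_mot_le_plus_long dico (mot_le_plus_long dico)

-- ===== LEMMAS AND PROOFS =====

-- A's loop step, applied to a key
def pvStepA (st : String × Int) (m : String) : String × Int :=
  if PySem.Str.len m > st.2 then (m, PySem.Str.len m) else st

-- the insertion step of the stable reverse sort (sorted_rev_eq_foldl_insertBy)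
def pvIns (x : String) (acc : List String) : List String :=
  PySem.List.insertBy (fun a b => decide (PySem.Str.len b < PySem.Str.len a)) x acc

lemma pv_len_nonneg (s : String) : 0 ≤ PySem.Str.len s := by
  rw [PySem.Str.len_eq]; exact Int.natCast_nonneg _

lemma pv_len_zero (s : String) (h : PySem.Str.len s = 0) : s = "" := by
  rw [PySem.Str.len_eq] at h
  have h' : s.toList = [] := List.eq_nil_of_length_eq_zero (by exact_mod_cast h)
  have := congrArg String.ofList h'
  simpa using this

lemma pvIns_cons (x h : String) (t : List String) :
    pvIns x (h :: t) =
      if PySem.Str.len h < PySem.Str.len x then x :: h :: t else h :: pvIns x t := by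
  simp [pvIns, PySem.List.insertBy]

-- simulation relation between the insertion-sort accumulator and A's running state
def pvRel (acc : List String) (st : String × Int) : Prop :=
  (acc = [] ∧ st = ("", 0)) ∨
  ∃ h t, acc = h :: t ∧
    st = ((if 0 < PySem.Str.len h then h else ""), PySem.Str.len h)

lemma pvRel_step (acc : List String) (st : String × Int) (x : String)
    (hr : pvRel acc st) : pvRel (pvIns x acc) (pvStepA st x) := by
  rcases hr with ⟨ha, hs⟩ | ⟨h, t, ha, hs⟩
  · subst ha; subst hs
    right
    refine ⟨x, [], by simp [pvIns, PySem.List.insertBy], ?_⟩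
    by_cases h0 : 0 < PySem.Str.len x
    · simp only [pvStepA, gt_iff_lt, if_pos h0]
    · have he : PySem.Str.len x = 0 := le_antisymm (not_lt.mp h0) (pv_len_nonneg x)
      simp only [pvStepA, gt_iff_lt, he]
      simp
  · subst ha; subst hs
    rw [pvIns_cons]
    by_cases hc : PySem.Str.len h < PySem.Str.len x
    · have hx0 : 0 < PySem.Str.len x := lt_of_le_of_lt (pv_len_nonneg h) hc
      rw [if_pos hc]
      right
      refine ⟨x, h :: t, rfl, ?_⟩
      simp only [pvStepA, gt_iff_lt, if_pos hc, if_pos hx0]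
    · rw [if_neg hc]
      right
      refine ⟨h, pvIns x t, rfl, ?_⟩
      simp only [pvStepA, gt_iff_lt, if_neg hc]

lemma pvRel_foldl (ks : List String) :
    ∀ (acc : List String) (st : String × Int), pvRel acc st →
      pvRel (ks.foldl (fun a x => pvIns x a) acc) (ks.foldl pvStepA st) := by
  induction ks with
  | nil => intro acc st h; exact h
  | cons k ks ih =>
    intro acc st h
    exact ih _ _ (pvRel_step acc st k h)

lemma pv_main (ks : List String) :
    pvRel (PySem.List.sorted ks (fun m => PySem.Str.len m) true)
      (ks.foldl pvStepA ("", 0)) := by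
  rw [PySem.List.sorted_rev_eq_foldl_insertBy]
  exact pvRel_foldl ks [] ("", 0) (Or.inl ⟨rfl, rfl⟩)

-- ===== VERDICT (by name: the statement is the Claim_ definition above) =====
theorem mot_le_plus_long_spec : Claim_equal_mot_le_plus_long := by
  intro dico _
  unfold Spec_mot_le_plus_long mot_le_plus_long mot_le_plus_long_alt
  have hfold : dico.foldl
      (fun st mot => if PySem.Str.len mot.1 > st.2 then (mot.1, PySem.Str.len mot.1) else st)
      ("", 0) = (dico.map Prod.fst).foldl pvStepA ("", 0) := by
    rw [List.foldl_map]; rfl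
  rw [hfold]
  rcases dico with _ | ⟨p, rest⟩
  · simp
  · have h := pv_main ((p :: rest).map Prod.fst)
    rcases h with ⟨ha, _⟩ | ⟨h, t, ha, hs⟩
    · have hp := PySem.List.sorted_perm ((p :: rest).map Prod.fst)
        (fun m => PySem.Str.len m) true
      rw [ha] at hp
      exact absurd (List.nil_perm.mp hp) (by simp)
    · rw [hs, ha]
      simp only [List.isEmpty_cons, Bool.false_eq_true, if_false, List.headD_cons]
      by_cases h0 : 0 < PySem.Str.len h
      · rw [if_pos h0]
      · have he : PySem.Str.len h = 0 := le_antisymm (not_lt.mp h0) (pv_len_nonneg h)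
        rw [if_neg h0, pv_len_zero h he]
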